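-- pv_equiv track=rewrite | github.com/FuatAkdemir/Some_Algorithms | ArrayCouples.py | arraycouples
-- ===== SOURCE A (Python) =====
-- from itertools import chain
--
-- def arraycouples(arr):
--     result = []
--     while len(arr) > 0:
--         temp = arr[:2]
--         arr = arr[2:]
--         if temp[::-1] in result:
--             result.remove(temp[::-1])
--         else:
--             result.append(temp)
--
--     result = ",".join(map(str, chain.from_iterable(result)))
--     return "yes" if len(result) == 0 else result
-- ===== SOURCE B (Python) =====
-- def arraycouples(arr):
--     # O(n): hash map value-pair -> (ever-appended slot indices, cursor) for O(1) first-match cancellation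
--     slots = []   # appended pairs in order; cancelled ones overwritten with None
--     log = {}     # pair tuple -> [list of slot indices ever appended with that pair, cursor to first alive one]
--     for i in range(0, len(arr), 2):
--         t = tuple(arr[i:i + 2])
--         e = log.get(t[::-1])
--         if e and e[1] < len(e[0]):
--             slots[e[0][e[1]]] = None
--             e[1] += 1
--         else:
--             me = log.setdefault(t, [[], 0])
--             me[0].append(len(slots))
--             slots.append(t)
--     out = ",".join(str(x) for p in slots if p is not None for x in p)
--     return out if out else "yes"
-- ===== Notes on version B (the rewrite author's own statement) =====
-- stated objective: faster
-- what changed: Replaces A's O(n) list membership test and list.remove per pair by a hash map from pair to (slot-index list, cursor), so each reversed-pair cancellation finds and kills the first surviving match in O(1); surviving pairs are kept in order in a slots list with cancelled entries marked None.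
import Mathlib
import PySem

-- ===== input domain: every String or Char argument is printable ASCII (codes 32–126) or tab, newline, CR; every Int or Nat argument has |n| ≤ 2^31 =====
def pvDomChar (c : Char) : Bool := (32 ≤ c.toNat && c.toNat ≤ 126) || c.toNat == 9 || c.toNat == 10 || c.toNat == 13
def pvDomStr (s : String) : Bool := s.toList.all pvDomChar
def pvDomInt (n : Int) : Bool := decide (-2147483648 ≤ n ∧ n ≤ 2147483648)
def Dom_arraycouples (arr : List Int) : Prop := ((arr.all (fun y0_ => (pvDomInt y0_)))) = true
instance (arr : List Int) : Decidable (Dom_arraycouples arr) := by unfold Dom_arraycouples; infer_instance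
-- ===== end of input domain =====

-- B replaces A's quadratic list-membership/remove cancellation by a hash map pair -> (slot indices, cursor)
-- giving O(1) first-match cancellation; same return value everywhere.

-- ===== PORT A =====
-- the while-loop of A: consume arr two at a time, cancelling reversed pairs in result
-- (temp[::-1] is List.reverse, exact by PySem.List.slice?_none_none_neg_one)
def arraycouplesLoopA (arr : List Int) (result : List (List Int)) : List (List Int) :=
  if 0 < arr.length then
    let temp := PySem.List.slice arr none (some 2)
    let rest := PySem.List.slice arr (some 2) none
    if temp.reverse ∈ result then
      arraycouplesLoopA rest ((PySem.List.remove? result temp.reverse).getD result)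
    else
      arraycouplesLoopA rest (result ++ [temp])
  else result
termination_by arr.length
decreasing_by
  all_goals
    (have h2 : PySem.List.slice arr (some 2) none = arr.drop 2 := by
       simpa using PySem.List.slice_from arr (a := 2) (by omega)
     simp [h2]; omega)

def arraycouples (arr : List Int) : String :=
  let result := arraycouplesLoopA arr []
  -- chain.from_iterable(result) is result.flatten (exact: concatenation of the inner lists in order)
  let s := PySem.Str.join "," (result.flatten.map PySem.Int.toStr)
  if PySem.Str.len s = 0 then "yes" else s

-- ===== PORT B =====
-- append step: slots.append(t) and log.setdefault(t, [[],0])[0].append(len(slots))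
-- (setdefault+list-append = overwrite in place with the index appended; insertion order preserved)
def arraycouplesAppendB (t : List Int) (slots : List (Option (List Int)))
    (log : PySem.Dict (List Int) (List Nat × Nat)) :
    List (Option (List Int)) × PySem.Dict (List Int) (List Nat × Nat) :=
  let me := log.getD t ([], 0)
  (slots ++ [some t], log.insert t (me.1 ++ [slots.length], me.2))

-- the for-loop of B: t = tuple(arr[i:i+2]); cancel via log, else append
def arraycouplesLoopB (arr : List Int) (slots : List (Option (List Int)))
    (log : PySem.Dict (List Int) (List Nat × Nat)) : List (Option (List Int)) :=
  if 0 < arr.length then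
    let t := PySem.List.slice arr none (some 2)
    let rest := PySem.List.slice arr (some 2) none
    match log.get? t.reverse with
    | some (l, k) =>
      if k < l.length then
        -- slots[e[0][e[1]]] = None; e[1] += 1
        arraycouplesLoopB rest (slots.set (l.getD k 0) none) (log.insert t.reverse (l, k + 1))
      else
        let s := arraycouplesAppendB t slots log
        arraycouplesLoopB rest s.1 s.2
    | none =>
      let s := arraycouplesAppendB t slots log
      arraycouplesLoopB rest s.1 s.2
  else slots
termination_by arr.length
decreasing_by
  all_goals
    (have h2 : PySem.List.slice arr (some 2) none = arr.drop 2 := by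
       simpa using PySem.List.slice_from arr (a := 2) (by omega)
     simp [h2]; omega)

def arraycouples_alt (arr : List Int) : String :=
  let slots := arraycouplesLoopB arr [] PySem.Dict.empty
  let out := PySem.Str.join ","
    ((slots.flatMap (fun p => match p with | some q => q | none => [])).map PySem.Int.toStr)
  if PySem.Str.len out = 0 then "yes" else out

-- ===== PRECONDITION & SPEC =====
def Spec_arraycouples (arr : List Int) (out : String) : Prop := out = arraycouples_alt arr
instance (arr : List Int) (out : String) : Decidable (Spec_arraycouples arr out) := by unfold Spec_arraycouples; infer_instance

-- ===== CLAIM (what is proved, stated in full; the proofs are below) =====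
def Claim_equal_arraycouples : Prop := ∀ (arr : List Int), Dom_arraycouples arr → Spec_arraycouples arr (arraycouples arr)

-- ===== LEMMAS AND PROOFS =====

-- the indices of the alive slots currently holding pair p, in increasing order
def aliveIdxs (slots : List (Option (List Int))) (p : List Int) : List Nat :=
  (List.range slots.length).filter (fun i => decide (slots.getD i none = some p))

-- loop invariant for B's dictionary: each stored (l, k) lists, from position k on,
-- exactly the alive slot indices for that pair
def InvB (slots : List (Option (List Int))) (log : PySem.Dict (List Int) (List Nat × Nat)) : Prop :=
  ∀ p, match log.get? p with
       | some (l, k) => k ≤ l.length ∧ l.drop k = aliveIdxs slots p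
       | none => aliveIdxs slots p = []

theorem aliveIdxs_nil (p : List Int) : aliveIdxs [] p = [] := rfl

theorem aliveIdxs_cons (o : Option (List Int)) (tl : List (Option (List Int))) (p : List Int) :
    aliveIdxs (o :: tl) p =
      (if o = some p then [0] else []) ++ (aliveIdxs tl p).map (· + 1) := by
  simp only [aliveIdxs, List.length_cons, List.range_succ_eq_map, List.filter_cons,
    List.getD_cons_zero, List.filter_map]
  by_cases h : o = some p <;>
    simp [h, Function.comp_def] <;>
    exact List.map_congr_left fun x _ => rfl

theorem mem_filterMap_iff_alive (slots : List (Option (List Int))) (p : List Int) :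
    p ∈ slots.filterMap id ↔ aliveIdxs slots p ≠ [] := by
  induction slots with
  | nil => simp [aliveIdxs_nil]
  | cons o tl ih =>
    rw [aliveIdxs_cons]
    cases o with
    | none => simpa using ih
    | some q =>
      by_cases h : q = p
      · subst h; simp
      · have h' : ¬(some q = some p) := by simp [h]
        have h2 : ¬ p = q := fun hc => h hc.symm
        simp [h', h2, ← ih]

theorem alive_set_head (slots : List (Option (List Int))) (rev : List Int) (i : Nat) (r : List Nat)
    (h : aliveIdxs slots rev = i :: r) :
    (slots.set i none).filterMap id = (slots.filterMap id).erase rev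
    ∧ ∀ p, aliveIdxs (slots.set i none) p =
        if p = rev then (aliveIdxs slots rev).tail else aliveIdxs slots p := by
  induction slots generalizing i r with
  | nil => simp [aliveIdxs_nil] at h
  | cons o tl ih =>
    rw [aliveIdxs_cons] at h
    by_cases ho : o = some rev
    · simp only [ho] at h
      injection h with hi hr
      subst hi
      constructor
      · simp [ho]
      · intro p
        by_cases hp : p = rev
        · subst hp; simp [ho, aliveIdxs_cons]
        · have hrp : ¬ rev = p := fun hc => hp hc.symm
          simp [ho, hp, hrp, aliveIdxs_cons]
    · simp only [if_neg ho] at h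
      obtain ⟨i', r', htl, hi, hr⟩ := List.map_eq_cons_iff.mp h
      subst hi hr
      obtain ⟨ih1, ih2⟩ := ih i' r' htl
      constructor
      · cases o with
        | none => simpa [List.filterMap_cons] using ih1
        | some q =>
          have hq : q ≠ rev := fun hc => ho (by rw [hc])
          simpa [List.filterMap_cons, List.erase_cons, hq] using ih1
      · intro p
        rw [List.set_cons_succ, aliveIdxs_cons, ih2 p, aliveIdxs_cons]
        by_cases hp : p = rev
        · subst hp
          simp [ho, htl]
        · simp [hp]
          rw [aliveIdxs_cons]

theorem alive_append (slots : List (Option (List Int))) (t p : List Int) :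
    aliveIdxs (slots ++ [some t]) p =
      aliveIdxs slots p ++ (if p = t then [slots.length] else []) := by
  induction slots with
  | nil =>
    by_cases h : p = t
    · subst h; simp [aliveIdxs_cons, aliveIdxs_nil]
    · have h' : ¬ t = p := fun hc => h hc.symm
      simp [aliveIdxs_cons, aliveIdxs_nil, h, h']
  | cons o tl ih =>
    rw [List.cons_append, aliveIdxs_cons, ih, aliveIdxs_cons]
    by_cases h : p = t <;> simp [h]

theorem invB_append (slots : List (Option (List Int)))
    (log : PySem.Dict (List Int) (List Nat × Nat)) (t : List Int) (hinv : InvB slots log) :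
    InvB (slots ++ [some t])
      (log.insert t ((log.getD t ([], 0)).1 ++ [slots.length], (log.getD t ([], 0)).2)) := by
  intro p
  by_cases hp : p = t
  · subst hp
    rw [PySem.Dict.get?_insert_self]
    have hinvp := hinv p
    cases hg : log.get? p with
    | none =>
      rw [hg] at hinvp
      have hgd : log.getD p ([], 0) = ([], 0) := by simp [PySem.Dict.getD_eq_get?_getD, hg]
      rw [hgd]
      simp [alive_append, hinvp]
    | some v =>
      rw [hg] at hinvp
      obtain ⟨l0, k0⟩ := v
      have hgd : log.getD p ([], 0) = (l0, k0) := by simp [PySem.Dict.getD_eq_get?_getD, hg]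
      rw [hgd]
      refine ⟨by simp; omega, ?_⟩
      rw [List.drop_append_of_le_length hinvp.1, hinvp.2, alive_append]
      simp
  · rw [PySem.Dict.get?_insert_of_ne _ _ hp]
    have hinvp := hinv p
    cases hg : log.get? p with
    | none => rw [hg] at hinvp; simp [alive_append, hinvp, hp]
    | some v =>
      rw [hg] at hinvp
      obtain ⟨l0, k0⟩ := v
      exact ⟨hinvp.1, by rw [hinvp.2, alive_append]; simp [hp]⟩

theorem invB_cancel (slots : List (Option (List Int)))
    (log : PySem.Dict (List Int) (List Nat × Nat)) (rev : List Int) (l : List Nat) (k : Nat)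
    (hk : k < l.length) (hdrop : l.drop k = aliveIdxs slots rev)
    (halive' : ∀ p, aliveIdxs (slots.set (l.getD k 0) none) p =
        if p = rev then (aliveIdxs slots rev).tail else aliveIdxs slots p)
    (hinv : InvB slots log) :
    InvB (slots.set (l.getD k 0) none) (log.insert rev (l, k + 1)) := by
  intro p
  by_cases hp : p = rev
  · subst hp
    rw [PySem.Dict.get?_insert_self]
    refine ⟨by omega, ?_⟩
    rw [halive' p, if_pos rfl, ← hdrop, List.tail_drop]
  · rw [PySem.Dict.get?_insert_of_ne _ _ hp]
    have hinvp := hinv p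
    cases hg : log.get? p with
    | none => rw [hg] at hinvp; rw [halive' p, if_neg hp]; exact hinvp
    | some v =>
      rw [hg] at hinvp
      obtain ⟨l0, k0⟩ := v
      exact ⟨hinvp.1, by rw [halive' p, if_neg hp]; exact hinvp.2⟩

theorem loopA_eq_loopB (n : Nat) : ∀ (arr : List Int), arr.length ≤ n →
    ∀ slots log, InvB slots log →
    arraycouplesLoopA arr (slots.filterMap id) = (arraycouplesLoopB arr slots log).filterMap id := by
  induction n with
  | zero =>
    intro arr h slots log _
    have : arr = [] := List.eq_nil_of_length_eq_zero (Nat.le_zero.mp h)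
    subst this
    rw [arraycouplesLoopA, arraycouplesLoopB]; simp
  | succ n ih =>
    intro arr h slots log hinv
    by_cases harr : 0 < arr.length
    swap
    · rw [arraycouplesLoopA, arraycouplesLoopB]; simp [harr]
    rw [arraycouplesLoopA, arraycouplesLoopB]
    simp only [if_pos harr]
    have hfrom : PySem.List.slice arr (some 2) none = arr.drop 2 := by
      simpa using PySem.List.slice_from arr (a := 2) (by omega)
    have hlen : (arr.drop 2).length ≤ n := by simp; omega
    set t := PySem.List.slice arr none (some 2) with ht
    set rest := PySem.List.slice arr (some 2) none with hrest
    have hlen' : rest.length ≤ n := by rw [hfrom]; exact hlen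
    have hinvrev := hinv t.reverse
    cases hget : log.get? t.reverse with
    | none =>
      rw [hget] at hinvrev
      -- deque absent → rev not alive → both sides append
      have hmem : t.reverse ∉ slots.filterMap id := by
        rw [mem_filterMap_iff_alive]; simp [hinvrev]
      simp only [if_neg hmem, arraycouplesAppendB]
      have hfm : (slots ++ [some t]).filterMap id = slots.filterMap id ++ [t] := by simp
      rw [← hfm]
      exact ih rest hlen' _ _ (invB_append slots log t hinv)
    | some v =>
      obtain ⟨l, k⟩ := v
      rw [hget] at hinvrev
      obtain ⟨hkle, hdrop⟩ := hinvrev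
      by_cases hk : k < l.length
      · -- cancel case: B marks the first alive slot dead, A removes the first occurrence
        simp only [if_pos hk]
        have hdropcons : l.drop k = l.getD k 0 :: l.drop (k + 1) := by
          rw [List.getD_eq_getElem l 0 hk]; exact List.drop_eq_getElem_cons hk
        have halive : aliveIdxs slots t.reverse = l.getD k 0 :: l.drop (k + 1) := by
          rw [← hdrop]; exact hdropcons
        have hmem : t.reverse ∈ slots.filterMap id := by
          rw [mem_filterMap_iff_alive, halive]; simp
        obtain ⟨hfm, halive'⟩ := alive_set_head slots t.reverse (l.getD k 0) (l.drop (k + 1)) halive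
        simp only [if_pos hmem]
        rw [PySem.List.remove?_eq_some_erase _ _ hmem]
        simp only [Option.getD_some]
        rw [← hfm]
        exact ih rest hlen' _ _ (invB_cancel slots log t.reverse l k hk hdrop halive' hinv)
      · -- exhausted cursor → rev not alive → both sides append
        simp only [if_neg hk]
        have halive : aliveIdxs slots t.reverse = [] := by
          rw [← hdrop, List.drop_eq_nil_iff]; omega
        have hmem : t.reverse ∉ slots.filterMap id := by
          rw [mem_filterMap_iff_alive]; simp [halive]
        simp only [if_neg hmem, arraycouplesAppendB]
        have hfm : (slots ++ [some t]).filterMap id = slots.filterMap id ++ [t] := by simp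
        rw [← hfm]
        exact ih rest hlen' _ _ (invB_append slots log t hinv)

theorem flatMap_opt (slots : List (Option (List Int))) :
    (slots.flatMap (fun p => match p with | some q => q | none => [])) =
      (slots.filterMap id).flatten := by
  induction slots with
  | nil => rfl
  | cons o tl ih => cases o <;> simp [ih]

-- ===== VERDICT (by name: the statement is the Claim_ definition above) =====
theorem arraycouples_spec : Claim_equal_arraycouples := by
  intro arr _
  unfold Spec_arraycouples arraycouples arraycouples_alt
  dsimp only
  have hinv : InvB [] PySem.Dict.empty := by
    intro p; rw [PySem.Dict.get?_empty]; rfl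
  have h := loopA_eq_loopB arr.length arr (le_refl _) [] PySem.Dict.empty hinv
  simp only [List.filterMap_nil] at h
  rw [flatMap_opt, ← h]
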